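-- pv_equiv track=rewrite | github.com/sunilsoni/interview-notes-python | com/interview/2025/april/cisco/test1/funcDrop2.py | funcDrop
-- ===== SOURCE A (Python) =====
-- from collections import defaultdict
--
-- def funcDrop(xCoordinate, yCoordinate):
--     """
--     Returns the maximum number of distinct drop‑points
--     that lie on a single vertical (x = c) or horizontal (y = c) line.
--     A valid path needs at least two different coordinates.
--     """
--     # Build:  x -> set of all y's on that x
--     #         y -> set of all x's on that y
--     x_to_ys = defaultdict(set)
--     y_to_xs = defaultdict(set)
--
--     for x, y in zip(xCoordinate, yCoordinate):
--         x_to_ys[x].add(y)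
--         y_to_xs[y].add(x)
--
--     # Largest vertical & horizontal path lengths
--     max_vert = max((len(ys) for ys in x_to_ys.values()), default=0)
--     max_horz = max((len(xs) for xs in y_to_xs.values()), default=0)
--
--     best = max(max_vert, max_horz)
--     return best if best >= 2 else 0  # 0 when no valid path
-- ===== SOURCE B (Python) =====
-- def funcDrop(xCoordinate, yCoordinate):
--     """Brute force, no dictionaries: for every point, scan the whole point
--     list collecting the distinct partner coordinates on its vertical
--     (resp. horizontal) line, and keep the best count seen."""
--     pts = list(zip(xCoordinate, yCoordinate))
--     best = 0
--     for x0, _ in pts: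
--         ys = []
--         for x, y in pts:
--             if x == x0 and y not in ys:
--                 ys.append(y)
--         best = max(best, len(ys))
--     for _, y0 in pts:
--         xs = []
--         for x, y in pts:
--             if y == y0 and x not in xs:
--                 xs.append(x)
--         best = max(best, len(xs))
--     return best if best >= 2 else 0
-- ===== Notes on version B (the rewrite author's own statement) =====
-- stated objective: alternative
-- what changed: A aggregates with two defaultdicts mapping x->set(ys) and y->set(xs) and maximises over the set sizes; B uses no dictionary or set at all: for each point it rescans the whole point list, collecting the distinct partner coordinates on that point's line into a plain list, and keeps the running maximum.
import Mathlib
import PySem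

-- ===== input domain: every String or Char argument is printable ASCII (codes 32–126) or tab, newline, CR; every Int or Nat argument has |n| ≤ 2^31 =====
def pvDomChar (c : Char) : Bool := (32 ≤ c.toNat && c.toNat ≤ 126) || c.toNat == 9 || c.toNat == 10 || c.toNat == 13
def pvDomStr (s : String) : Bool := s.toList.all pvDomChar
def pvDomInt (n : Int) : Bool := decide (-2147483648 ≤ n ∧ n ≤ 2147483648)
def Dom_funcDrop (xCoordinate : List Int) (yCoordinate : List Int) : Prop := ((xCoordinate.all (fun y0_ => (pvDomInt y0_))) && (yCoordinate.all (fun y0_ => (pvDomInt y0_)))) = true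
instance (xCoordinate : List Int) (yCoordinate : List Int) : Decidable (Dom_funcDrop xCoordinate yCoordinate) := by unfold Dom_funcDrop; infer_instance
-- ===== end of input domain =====

-- B replaces A's dict-of-sets aggregation by dictionary-free nested scans: for
-- each point it rescans all points, collecting the distinct partners on that
-- point's line into a plain list (objective: alternative; B is not faster).

-- ===== PORT A =====
-- x_to_ys / y_to_xs built in one pass over zip; defaultdict(set) access = modify with empty-set default.
def funcDrop (xCoordinate : List Int) (yCoordinate : List Int) : Int :=
  let pairs := xCoordinate.zip yCoordinate
  let dicts := pairs.foldl
    (fun (d : PySem.Dict Int (PySem.Set Int) × PySem.Dict Int (PySem.Set Int)) p =>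
      (d.1.modify p.1 PySem.Set.empty (fun s => PySem.Set.add s p.2),
       d.2.modify p.2 PySem.Set.empty (fun s => PySem.Set.add s p.1)))
    (PySem.Dict.empty, PySem.Dict.empty)
  let maxVert := PySem.List.maxD (dicts.1.values.map (fun ys => (ys.length : Int))) (fun y => y) 0
  let maxHorz := PySem.List.maxD (dicts.2.values.map (fun xs => (xs.length : Int))) (fun y => y) 0
  let best := max maxVert maxHorz
  if best ≥ 2 then best else 0

-- ===== PORT B =====
-- pts = list(zip(...)); two brute-force nested loops threading one running best.
def funcDrop_alt (xCoordinate : List Int) (yCoordinate : List Int) : Int :=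
  let pts := xCoordinate.zip yCoordinate
  let best1 := pts.foldl
    (fun best p0 =>
      let ys := pts.foldl
        (fun acc p => if p.1 == p0.1 && !(acc.contains p.2) then acc ++ [p.2] else acc) []
      max best (ys.length : Int)) 0
  let best := pts.foldl
    (fun best p0 =>
      let xs := pts.foldl
        (fun acc p => if p.2 == p0.2 && !(acc.contains p.1) then acc ++ [p.1] else acc) []
      max best (xs.length : Int)) best1
  if best ≥ 2 then best else 0

-- ===== PRECONDITION & SPEC =====
def Spec_funcDrop (xCoordinate : List Int) (yCoordinate : List Int) (out : Int) : Prop := out = funcDrop_alt xCoordinate yCoordinate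
instance (xCoordinate : List Int) (yCoordinate : List Int) (out : Int) : Decidable (Spec_funcDrop xCoordinate yCoordinate out) := by unfold Spec_funcDrop; infer_instance

-- ===== CLAIM (what is proved, stated in full; the proofs are below) =====
def Claim_equal_funcDrop : Prop := ∀ (xCoordinate : List Int) (yCoordinate : List Int), Dom_funcDrop xCoordinate yCoordinate → Spec_funcDrop xCoordinate yCoordinate (funcDrop xCoordinate yCoordinate)

-- ===== LEMMAS AND PROOFS =====

-- A's grouping fold: the dict's entry at c holds the distinct g-values of the elements with key c.
lemma getD_groupfold (l : List (Int × Int)) (f g : Int × Int → Int) (c : Int) :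
    (l.foldl (fun d a => PySem.Dict.modify d (f a) PySem.Set.empty (fun s => PySem.Set.add s (g a)))
        PySem.Dict.empty).getD c PySem.Set.empty
      = PySem.Set.ofList ((l.filter (fun a => f a == c)).map g) := by
  induction l using List.reverseRecOn with
  | nil => rfl
  | append_singleton l x ih =>
    rw [List.foldl_append, List.foldl_cons, List.foldl_nil, PySem.Dict.getD_modify,
      List.filter_append, List.map_append]
    by_cases hc : f x = c
    · subst hc
      simp only [List.filter_cons, BEq.rfl, ite_true, List.filter_nil,
        List.map_cons, List.map_nil, PySem.Set.ofList_append_singleton, ih]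
    · rw [if_neg (Ne.symm hc)]
      simp only [List.filter_cons, beq_iff_eq, if_neg hc, List.filter_nil,
        List.map_nil, List.append_nil, ih]

-- B's inner scan builds exactly the distinct g-values of the elements with key c.
lemma inner_scan (l : List (Int × Int)) (f g : Int × Int → Int) (c : Int) :
    l.foldl (fun acc p => if f p == c && !(acc.contains (g p)) then acc ++ [g p] else acc) []
      = PySem.Set.ofList ((l.filter (fun p => f p == c)).map g) := by
  have hstep : (fun (acc : List Int) p =>
      if f p == c && !(acc.contains (g p)) then acc ++ [g p] else acc)
      = (fun acc p => if f p == c then PySem.Set.add acc (g p) else acc) := by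
    funext acc p
    by_cases hc : (f p == c) = true
    · simp only [hc, Bool.true_and, PySem.Set.add, PySem.Set.contains]
      by_cases hm : acc.contains (g p) = true <;> simp
    · simp [hc]
  rw [hstep, ← List.foldl_filter, ← PySem.Set.update_nil_left,
    PySem.Set.update_map_eq_foldl_add]

-- running max distributes over a max in the initial accumulator
lemma foldl_max_init_max (m : List Int) (a b : Int) :
    m.foldl max (max a b) = max a (m.foldl max b) := by
  induction m generalizing b with
  | nil => rfl
  | cons x t ih => simpa [max_assoc] using ih (max b x)

-- a running max of a projection is a plain running max over the mapped list
lemma foldl_max_proj {α : Type} (l : List α) (F : α → Int) (i : Int) :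
    l.foldl (fun best p => max best (F p)) i = (l.map F).foldl max i := by
  rw [List.foldl_map]

-- a running max from 0 equals Python's max(…, default=0) over any list with the same members (all ≥ 0)
lemma foldl_max_zero_eq (m m' : List Int) (hmem : ∀ x, x ∈ m ↔ x ∈ m')
    (hpos : ∀ x ∈ m', 0 ≤ x) :
    m.foldl max 0 = PySem.List.maxD m' (fun y => y) 0 := by
  cases m' with
  | nil =>
    have : m = [] := List.eq_nil_iff_forall_not_mem.mpr (fun x hx => by
      simpa using (hmem x).mp hx)
    simp [this, PySem.List.maxD, PySem.List.max?]
  | cons a t =>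
    have hR : PySem.List.maxD (a :: t) (fun y => y) 0 = t.foldl max a := by
      simp [PySem.List.maxD, PySem.List.max?_id_cons]
    rw [hR]
    have hRub := PySem.List.le_foldl_max t a
    have hLub := PySem.List.le_foldl_max m 0
    apply le_antisymm
    · rcases PySem.List.foldl_max_mem m 0 with h0 | hmemL
      · rw [h0]
        exact le_trans (hpos a List.mem_cons_self) hRub.1
      · rcases List.mem_cons.mp ((hmem _).mp hmemL) with h | h
        · exact h ▸ hRub.1
        · exact hRub.2 _ h
    · rcases PySem.List.foldl_max_mem t a with h0 | hmemR
      · rw [h0]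
        exact hLub.2 _ ((hmem _).mpr List.mem_cons_self)
      · exact hLub.2 _ ((hmem _).mpr (List.mem_cons_of_mem a hmemR))

-- one side of A (max over the dict's set sizes) equals one brute-force pass of B (from init 0)
lemma side_eq (l : List (Int × Int)) (f g : Int × Int → Int) :
    l.foldl (fun best p0 =>
        max best ((l.foldl (fun acc p =>
          if f p == f p0 && !(acc.contains (g p)) then acc ++ [g p] else acc) []).length : Int)) 0
      = PySem.List.maxD
          ((l.foldl (fun d a => PySem.Dict.modify d (f a) PySem.Set.empty
              (fun s => PySem.Set.add s (g a))) PySem.Dict.empty).values.map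
            (fun s => ((s : List Int).length : Int))) (fun y => y) 0 := by
  set D := l.foldl (fun d a => PySem.Dict.modify d (f a) PySem.Set.empty
      (fun s => PySem.Set.add s (g a))) PySem.Dict.empty with hD
  have hnd : D.keys.Nodup :=
    PySem.Dict.nodup_keys_foldl_modify_key l f PySem.Set.empty (fun _ a s => PySem.Set.add s (g a))
      PySem.Dict.empty (by rw [PySem.Dict.keys_empty]; exact List.nodup_nil)
  have hkeys : D.keys = PySem.Set.ofList (l.map f) := by
    rw [hD, PySem.Dict.keys_foldl_modify_key l f PySem.Set.empty (fun _ a s => PySem.Set.add s (g a)),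
      PySem.Dict.keys_empty, PySem.Set.update_nil_left]
  have hvals : D.values.map (fun s => ((s : List Int).length : Int))
      = (PySem.Set.ofList (l.map f)).map
          (fun k => ((PySem.Set.ofList ((l.filter (fun p => f p == k)).map g)).length : Int)) := by
    rw [PySem.Dict.values_eq_map_keys D hnd PySem.Set.empty, List.map_map, hkeys]
    apply List.map_congr_left
    intro k _
    simp only [Function.comp_apply, hD, getD_groupfold]
  rw [hvals]
  have hb : ∀ p0 : Int × Int,
      (l.foldl (fun acc p =>
        if f p == f p0 && !(acc.contains (g p)) then acc ++ [g p] else acc) [])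
      = PySem.Set.ofList ((l.filter (fun p => f p == f p0)).map g) := fun p0 =>
    inner_scan l f g (f p0)
  simp only [hb]
  rw [foldl_max_proj l (fun p0 => ((PySem.Set.ofList
      ((l.filter (fun p => f p == f p0)).map g)).length : Int)) 0]
  apply foldl_max_zero_eq
  · intro x
    constructor
    · intro hx
      rcases List.mem_map.mp hx with ⟨p0, hp0, rfl⟩
      exact List.mem_map.mpr ⟨f p0, (PySem.Set.mem_ofList _ _).mpr
        (List.mem_map.mpr ⟨p0, hp0, rfl⟩), rfl⟩
    · intro hx
      rcases List.mem_map.mp hx with ⟨k, hk, rfl⟩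
      rcases List.mem_map.mp ((PySem.Set.mem_ofList _ _).mp hk) with ⟨p0, hp0, rfl⟩
      exact List.mem_map.mpr ⟨p0, hp0, rfl⟩
  · intro x hx
    rcases List.mem_map.mp hx with ⟨k, _, rfl⟩
    exact Int.natCast_nonneg _

-- ===== VERDICT (by name: the statement is the Claim_ definition above) =====
theorem funcDrop_spec : Claim_equal_funcDrop := by
  intro xs ys _
  unfold Spec_funcDrop
  simp only [funcDrop, funcDrop_alt]
  have hsplit : ((xs.zip ys).foldl
      (fun (d : PySem.Dict Int (PySem.Set Int) × PySem.Dict Int (PySem.Set Int)) p =>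
        (d.1.modify p.1 PySem.Set.empty (fun s => PySem.Set.add s p.2),
         d.2.modify p.2 PySem.Set.empty (fun s => PySem.Set.add s p.1)))
      (PySem.Dict.empty, PySem.Dict.empty))
      = ((xs.zip ys).foldl (fun d p => PySem.Dict.modify d p.1 PySem.Set.empty
            (fun s => PySem.Set.add s p.2)) PySem.Dict.empty,
         (xs.zip ys).foldl (fun d p => PySem.Dict.modify d p.2 PySem.Set.empty
            (fun s => PySem.Set.add s p.1)) PySem.Dict.empty) :=
    PySem.List.foldl_prod_mk
      (f := fun (d : PySem.Dict Int (PySem.Set Int)) p =>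
        PySem.Dict.modify d p.1 PySem.Set.empty (fun s => PySem.Set.add s p.2))
      (g := fun (d : PySem.Dict Int (PySem.Set Int)) p =>
        PySem.Dict.modify d p.2 PySem.Set.empty (fun s => PySem.Set.add s p.1)) (xs.zip ys) _ _
  rw [hsplit]
  have h1 := side_eq (xs.zip ys) Prod.fst Prod.snd
  have h2 := side_eq (xs.zip ys) Prod.snd Prod.fst
  set l := xs.zip ys with hl
  set best1 := l.foldl
    (fun best p0 =>
      max best (((l.foldl (fun acc p =>
        if p.1 == p0.1 && !(acc.contains p.2) then acc ++ [p.2] else acc) []).length : Int))) 0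
    with hb1
  set pass2 := l.foldl
    (fun best p0 =>
      max best (((l.foldl (fun acc p =>
        if p.2 == p0.2 && !(acc.contains p.1) then acc ++ [p.1] else acc) []).length : Int))) 0
    with hp2
  have hb1nonneg : (0:Int) ≤ best1 := by
    rw [hb1, foldl_max_proj]
    exact (PySem.List.le_foldl_max _ 0).1
  have hthread : l.foldl
      (fun best p0 =>
        max best (((l.foldl (fun acc p =>
          if p.2 == p0.2 && !(acc.contains p.1) then acc ++ [p.1] else acc) []).length : Int)))
      best1 = max best1 pass2 := by
    rw [foldl_max_proj]
    conv_lhs => rw [← max_eq_left hb1nonneg]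
    rw [foldl_max_init_max, hp2, ← foldl_max_proj]
  rw [hthread]
  dsimp only
  rw [← h1, ← h2]
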